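-- pv_equiv track=rewrite | github.com/vasylcherepushko/Codewars | comfortable_words.py | comfortable_word
-- ===== SOURCE A (Python) =====
-- def comfortable_word(word):
--     left = 'qwertasdfgzxcvb'
--     right = 'yuiophjklnm'
--     previous_in_left = True if word[0] in left else False
--
--     for letter in word[1:]:
--         if letter in left and previous_in_left:
--             return False
--         if letter in right and not previous_in_left:
--             return False
--         previous_in_left = not previous_in_left
--
--     return True
-- ===== SOURCE B (Python) =====
-- def comfortable_word(word):
--     left = 'qwertasdfgzxcvb'
--     right = 'yuiophjklnm'
--     first_left = word[0] in left
--     evens, odds = word[::2], word[1::2]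
--     if first_left:
--         return not any(c in right for c in evens) and not any(c in left for c in odds)
--     return not any(c in left for c in evens) and not any(c in right for c in odds)
-- ===== Notes on version B (the rewrite author's own statement) =====
-- stated objective: alternative
-- what changed: Replaces A's single toggling loop (carrying previous_in_left across every letter) with two parity-split passes: slice the word into even and odd index positions and check each slice against its forbidden hand group with any().
import Mathlib
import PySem

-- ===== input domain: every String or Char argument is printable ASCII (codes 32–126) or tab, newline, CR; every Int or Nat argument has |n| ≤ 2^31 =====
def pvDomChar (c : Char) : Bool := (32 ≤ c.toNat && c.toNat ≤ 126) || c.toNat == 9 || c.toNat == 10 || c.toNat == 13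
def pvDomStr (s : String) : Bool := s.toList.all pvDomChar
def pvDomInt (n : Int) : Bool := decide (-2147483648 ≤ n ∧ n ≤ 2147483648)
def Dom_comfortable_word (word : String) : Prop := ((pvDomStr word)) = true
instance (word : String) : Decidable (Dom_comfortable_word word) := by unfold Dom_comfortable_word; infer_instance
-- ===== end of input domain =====

-- B replaces A's single toggling loop by two parity-split passes over the step-2 slices;
-- objective: alternative decomposition (same cost). Return value only; neither mutates.

-- ===== PORT A =====
-- the two letter groups ('left' / 'right' in the Python)
def cwLeft : List Char := ['q','w','e','r','t','a','s','d','f','g','z','x','c','v','b']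
def cwRight : List Char := ['y','u','i','o','p','h','j','k','l','n','m']

-- the for-loop over word[1:], carrying previous_in_left
def cwLoop : List Char → Bool → Bool
  | [], _ => true
  | c :: rest, prev =>
    if c ∈ cwLeft && prev then false
    else if c ∈ cwRight && !prev then false
    else cwLoop rest (!prev)

def comfortable_word (word : String) : Bool :=
  match word.toList with
  | [] => false            -- word[0] raises IndexError; excluded by Pre_
  | c :: rest => cwLoop rest (decide (c ∈ cwLeft))

-- ===== PORT B =====
-- hand port of the step-2 slice xs[::2] (exact: first element, then every other)
def everyOther : List Char → List Char
  | [] => []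
  | [c] => [c]
  | c :: _ :: rest => c :: everyOther rest

def comfortable_word_alt (word : String) : Bool :=
  match word.toList with
  | [] => false            -- word[0] raises IndexError; excluded by Pre_
  | c :: rest =>
    let evens := everyOther (c :: rest)   -- word[::2]
    let odds := everyOther rest           -- word[1::2]
    if c ∈ cwLeft then
      !(evens.any (· ∈ cwRight)) && !(odds.any (· ∈ cwLeft))
    else
      !(evens.any (· ∈ cwLeft)) && !(odds.any (· ∈ cwRight))

-- ===== PRECONDITION & SPEC =====
-- Pre_ excludes only the empty string, on which A (and B) raise IndexError at word[0].
def Pre_comfortable_word (word : String) : Prop := word ≠ ""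
instance (word : String) : Decidable (Pre_comfortable_word word) := by unfold Pre_comfortable_word; infer_instance
def pvWitness_comfortable_word : String := "qh"

def Spec_comfortable_word (word : String) (out : Bool) : Prop := out = comfortable_word_alt word
instance (word : String) (out : Bool) : Decidable (Spec_comfortable_word word out) := by unfold Spec_comfortable_word; infer_instance

-- ===== CLAIM (what is proved, stated in full; the proofs are below) =====
def Claim_equal_comfortable_word : Prop := ∀ (word : String), Dom_comfortable_word word → Pre_comfortable_word word → Spec_comfortable_word word (comfortable_word word)

-- ===== LEMMAS AND PROOFS =====

@[simp] lemma everyOther_cons (c : Char) (rest : List Char) :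
    everyOther (c :: rest) = c :: everyOther rest.tail := by
  cases rest <;> rfl

lemma left_right_disjoint (c : Char) (h : c ∈ cwLeft) : c ∉ cwRight := by
  simp only [cwLeft, List.mem_cons, List.not_mem_nil, or_false] at h
  rcases h with h|h|h|h|h|h|h|h|h|h|h|h|h|h|h <;> subst h <;> decide

-- characterisation of A's loop as the two parity-split passes
lemma cwLoop_eq (l : List Char) (prev : Bool) :
    cwLoop l prev =
      ((!(everyOther l).any (· ∈ (if prev then cwLeft else cwRight))) &&
       (!(everyOther l.tail).any (· ∈ (if prev then cwRight else cwLeft)))) := by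
  induction l generalizing prev with
  | nil => cases prev <;> rfl
  | cons c rest ih =>
    rw [cwLoop]
    by_cases h1 : c ∈ cwLeft
    · have h2 : c ∉ cwRight := left_right_disjoint c h1
      cases prev <;> simp [ih, h1, h2, List.tail_cons, Bool.and_comm]
    · by_cases h2 : c ∈ cwRight <;>
        cases prev <;> simp [ih, h1, h2, List.tail_cons, Bool.and_comm]

theorem comfortable_word_spec : Claim_equal_comfortable_word := by
  intro word _ hpre
  unfold Spec_comfortable_word comfortable_word comfortable_word_alt
  cases hl : word.toList with
  | nil =>
    exact absurd (by simpa using congrArg String.ofList hl) hpre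
  | cons c rest =>
    by_cases h : c ∈ cwLeft
    · have hr : c ∉ cwRight := left_right_disjoint c h
      simp [h, hr, cwLoop_eq rest true, Bool.and_comm]
    · simp [h, cwLoop_eq rest false, Bool.and_comm]
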